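-- pv_equiv track=rewrite | github.com/Lenin-Franklin/BSE_AnnualReports_Scraper | Path A.py | has_evidence
-- ===== SOURCE A (Python) =====
-- WINDOW = 1
--
-- def has_evidence(sents, idx):
--     keywords = [
--         "implemented", "established", "maintained", "audit",
--         "certified", "monitored", "trained", "reviewed",
--         "tested", "assessed"
--     ]
--     lo = max(0, idx - WINDOW)
--     hi = min(len(sents) - 1, idx + WINDOW)
--     return any(
--         any(k in sents[i].lower() for k in keywords)
--         for i in range(lo, hi + 1)
--     )
-- ===== SOURCE B (Python) =====
-- WINDOW = 1
--
-- KEYWORDS = ("implemented established maintained audit certified monitored "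
--             "trained reviewed tested assessed").split()
--
--
-- def _scan(text):
--     # One left-to-right pass over text simulating all keyword prefixes at once
--     # (an Aho-Corasick-style state-set simulation without failure links):
--     # active holds the partial matches (keyword, matched_length) ending here.
--     active = []
--     for c in text:
--         nxt = []
--         for (k, l) in active + [(k, 0) for k in KEYWORDS]:
--             if l < len(k) and k[l] == c:
--                 if l + 1 == len(k):
--                     return True
--                 nxt.append((k, l + 1))
--         active = nxt
--     return False
--
--
-- def has_evidence(sents, idx):
--     window = sents[max(0, idx - WINDOW): max(0, idx + WINDOW + 1)]
--     for sent in window: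
--         if _scan(sent.lower()):
--             return True
--     return False
-- ===== Notes on version B (the rewrite author's own statement) =====
-- stated objective: alternative
-- what changed: A tests each keyword against each window sentence with independent substring searches; B scans each window sentence once left-to-right, maintaining a state set of live keyword-prefix partial matches (an Aho-Corasick-style multi-pattern simulation without failure links) and reporting the first completed keyword.
import Mathlib
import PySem

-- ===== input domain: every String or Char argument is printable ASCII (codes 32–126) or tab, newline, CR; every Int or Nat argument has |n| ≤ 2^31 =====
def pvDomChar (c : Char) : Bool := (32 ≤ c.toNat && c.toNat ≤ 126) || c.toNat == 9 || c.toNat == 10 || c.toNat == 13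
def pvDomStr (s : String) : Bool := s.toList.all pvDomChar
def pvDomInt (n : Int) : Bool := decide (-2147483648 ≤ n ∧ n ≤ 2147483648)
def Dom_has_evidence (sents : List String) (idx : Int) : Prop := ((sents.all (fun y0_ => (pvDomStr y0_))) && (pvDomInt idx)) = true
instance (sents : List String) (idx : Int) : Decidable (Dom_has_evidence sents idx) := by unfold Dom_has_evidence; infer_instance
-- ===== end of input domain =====

-- B replaces A's independent per-keyword substring searches by one left-to-right pass per
-- window sentence that maintains a state set of live keyword-prefix partial matches
-- (a multi-pattern state-set simulation); equivalence of the RETURN value is proved.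

-- ===== PORT A =====
def has_evidence (sents : List String) (idx : Int) : Bool :=
  let keywords : List String :=
    ["implemented", "established", "maintained", "audit",
     "certified", "monitored", "trained", "reviewed",
     "tested", "assessed"]
  let lo : Int := max 0 (idx - 1)
  let hi : Int := min ((sents.length : Int) - 1) (idx + 1)
  (PySem.List.pyRange lo (hi + 1)).any (fun i =>
    keywords.any (fun k =>
      PySem.Str.isIn k (PySem.Str.lower (PySem.List.pyGetD sents i ""))))

-- ===== PORT B =====
def pvKeysB : List String :=
  PySem.Str.split₀
    "implemented established maintained audit certified monitored trained reviewed tested assessed"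

def pvKeysC : List (List Char) := pvKeysB.map String.toList

-- inner candidate loop of _scan: builds nxt; `none` = a keyword completed (early return True)
def pvStepGo (c : Char) (acc : List (List Char × Nat)) :
    List (List Char × Nat) → Option (List (List Char × Nat))
  | [] => some acc
  | (k, l) :: rest =>
    match k[l]? with      -- `l < len(k) and k[l] == c`: k[l]? is none exactly when l ≥ len(k)
    | some ch =>
      if ch = c then
        if l + 1 = k.length then none
        else pvStepGo c (acc ++ [(k, l + 1)]) rest
      else pvStepGo c acc rest
    | none => pvStepGo c acc rest

-- `for c in text` loop of _scan, carrying the active partial matches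
def pvScanAux (active : List (List Char × Nat)) : List Char → Bool
  | [] => false
  | c :: rest =>
    match pvStepGo c [] (active ++ pvKeysC.map (fun k => (k, 0))) with
    | none => true
    | some nxt => pvScanAux nxt rest

def pvScan (text : List Char) : Bool := pvScanAux [] text

-- `for sent in window` loop of has_evidence with early return
def pvLoopB : List String → Bool
  | [] => false
  | sent :: rest =>
    if pvScan (PySem.Str.lower sent).toList then true
    else pvLoopB rest

def has_evidence_alt (sents : List String) (idx : Int) : Bool :=
  pvLoopB (PySem.List.slice sents (some (max 0 (idx - 1))) (some (max 0 (idx + 1 + 1))))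

-- ===== PRECONDITION & SPEC =====
def Spec_has_evidence (sents : List String) (idx : Int) (out : Bool) : Prop := out = has_evidence_alt sents idx
instance (sents : List String) (idx : Int) (out : Bool) : Decidable (Spec_has_evidence sents idx out) := by unfold Spec_has_evidence; infer_instance

-- ===== CLAIM (what is proved, stated in full; the proofs are below) =====
def Claim_equal_has_evidence : Prop := ∀ (sents : List String) (idx : Int), Dom_has_evidence sents idx → Spec_has_evidence sents idx (has_evidence sents idx)

-- ===== LEMMAS AND PROOFS =====

-- full-match test and advance function characterising one pvStepGo pass over the candidates
def pvFM (c : Char) (cands : List (List Char × Nat)) : Bool :=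
  cands.any (fun p => decide (p.1[p.2]? = some c) && decide (p.2 + 1 = p.1.length))

def pvAdv (c : Char) (cands : List (List Char × Nat)) : List (List Char × Nat) :=
  cands.filterMap (fun p =>
    if p.1[p.2]? = some c ∧ p.2 + 1 ≠ p.1.length then some (p.1, p.2 + 1) else none)

lemma pvFM_iff (c : Char) (cands : List (List Char × Nat)) :
    pvFM c cands = true ↔ ∃ p ∈ cands, p.1[p.2]? = some c ∧ p.2 + 1 = p.1.length := by
  simp [pvFM]

lemma pvStepGo_eq (c : Char) :
    ∀ (cands acc : List (List Char × Nat)),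
      pvStepGo c acc cands = if pvFM c cands then none else some (acc ++ pvAdv c cands)
  | [], acc => by simp [pvStepGo, pvFM, pvAdv]
  | (k, l) :: rest, acc => by
    have ih := pvStepGo_eq c rest
    rcases h : k[l]? with _ | ch
    · have hfm : pvFM c ((k, l) :: rest) = pvFM c rest := by simp [pvFM, h]
      have hadv : pvAdv c ((k, l) :: rest) = pvAdv c rest := by simp [pvAdv, h]
      show pvStepGo c acc ((k, l) :: rest) = _
      rw [show pvStepGo c acc ((k, l) :: rest) = pvStepGo c acc rest from by
        simp [pvStepGo, h], ih, hfm, hadv]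
    · by_cases hc : ch = c
      · by_cases hl : l + 1 = k.length
        · have hfm : pvFM c ((k, l) :: rest) = true := by
            rw [pvFM_iff]; exact ⟨(k, l), List.mem_cons_self, by rw [h, hc], hl⟩
          rw [show pvStepGo c acc ((k, l) :: rest) = none from by
            simp [pvStepGo, h, hc, hl], hfm]
          simp
        · have hfm : pvFM c ((k, l) :: rest) = pvFM c rest := by
            simp [pvFM, h, hc, hl]
          have hadv : pvAdv c ((k, l) :: rest) = (k, l + 1) :: pvAdv c rest := by
            simp [pvAdv, h, hc, hl]
          rw [show pvStepGo c acc ((k, l) :: rest)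
              = pvStepGo c (acc ++ [(k, l + 1)]) rest from by
            simp [pvStepGo, h, hc, hl], ih, hfm, hadv]
          simp
      · have hfm : pvFM c ((k, l) :: rest) = pvFM c rest := by
          simp [pvFM, h, hc]
        have hadv : pvAdv c ((k, l) :: rest) = pvAdv c rest := by
          simp [pvAdv, h, hc]
        rw [show pvStepGo c acc ((k, l) :: rest) = pvStepGo c acc rest from by
          simp [pvStepGo, h, hc], ih, hfm, hadv]

lemma pv_mem_adv {c : Char} {cands : List (List Char × Nat)} {q : List Char × Nat} :
    q ∈ pvAdv c cands ↔
      ∃ p ∈ cands, p.1[p.2]? = some c ∧ p.2 + 1 ≠ p.1.length ∧ q = (p.1, p.2 + 1) := by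
  simp only [pvAdv, List.mem_filterMap]
  constructor
  · rintro ⟨p, hp, hq⟩
    by_cases h : p.1[p.2]? = some c ∧ p.2 + 1 ≠ p.1.length
    · rw [if_pos h] at hq
      exact ⟨p, hp, h.1, h.2, (Option.some.inj hq).symm⟩
    · rw [if_neg h] at hq
      exact absurd hq (by simp)
  · rintro ⟨p, hp, h1, h2, rfl⟩
    exact ⟨p, hp, by rw [if_pos ⟨h1, h2⟩]⟩

-- every keyword is nonempty
lemma pv_keys_ne : ∀ k ∈ pvKeysC, k ≠ [] := by decide

-- the meaning of a scanner state before the remaining text t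
def pvM (s : List (List Char × Nat)) (t : List Char) : Prop :=
  (∃ p ∈ s, p.1.drop p.2 <+: t) ∨ (∃ k ∈ pvKeysC, k <:+: t)

lemma pv_scan_iff :
    ∀ (t : List Char) (s : List (List Char × Nat)),
      (∀ p ∈ s, p.1 ∈ pvKeysC ∧ p.2 < p.1.length) →
      (pvScanAux s t = true ↔ pvM s t)
  | [], s => by
    intro hinv
    show (false = true) ↔ pvM s []
    constructor
    · intro h; cases h
    · rintro (⟨p, hp, hpre⟩ | ⟨k, hk, hinf⟩)
      · exfalso
        have h1 := List.prefix_nil.mp hpre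
        rw [List.drop_eq_nil_iff] at h1
        have h2 := (hinv p hp).2
        omega
      · exact absurd (List.eq_nil_of_infix_nil hinf) (pv_keys_ne k hk)
  | c :: rest, s => by
    intro hinv
    set cands := s ++ pvKeysC.map (fun k => (k, 0)) with hcdef
    have hcands : ∀ p ∈ cands, p.1 ∈ pvKeysC := by
      intro p hp
      rcases List.mem_append.mp hp with hp | hp
      · exact (hinv p hp).1
      · obtain ⟨k, hk, rfl⟩ := List.mem_map.mp hp
        exact hk
    have hadvinv : ∀ p ∈ pvAdv c cands, p.1 ∈ pvKeysC ∧ p.2 < p.1.length := by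
      intro q hq
      obtain ⟨p, hp, h1, h2, rfl⟩ := pv_mem_adv.mp hq
      have hlt : p.2 < p.1.length := (List.getElem?_eq_some_iff.mp h1).1
      exact ⟨hcands p hp, by show p.2 + 1 < p.1.length; omega⟩
    have ih := pv_scan_iff rest (pvAdv c cands) hadvinv
    -- a full match on c implies pvM s (c :: rest)
    have hFMok : pvFM c cands = true → pvM s (c :: rest) := by
      intro hfm
      obtain ⟨p, hp, h1, h2⟩ := (pvFM_iff c cands).mp hfm
      have hlt : p.2 < p.1.length := (List.getElem?_eq_some_iff.mp h1).1
      have hdrop : p.1.drop p.2 = [c] := by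
        rw [List.drop_eq_getElem_cons hlt, (List.getElem?_eq_some_iff.mp h1).2,
          List.drop_eq_nil_iff.mpr (by omega)]
      rcases List.mem_append.mp hp with hps | hpk
      · exact Or.inl ⟨p, hps, by rw [hdrop]; exact ⟨rest, rfl⟩⟩
      · obtain ⟨k, hk, rfl⟩ := List.mem_map.mp hpk
        refine Or.inr ⟨k, hk, ?_⟩
        have hkc : k = [c] := by simpa using hdrop
        rw [hkc]
        have hp' : [c] <+: c :: rest := ⟨rest, rfl⟩
        exact hp'.isInfix
    -- transfer between pvM of the advanced state and pvM of s
    have htrans : pvFM c cands = false → (pvM (pvAdv c cands) rest ↔ pvM s (c :: rest)) := by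
      intro hnfm
      have hnfm' : ¬ ∃ p ∈ cands, p.1[p.2]? = some c ∧ p.2 + 1 = p.1.length := by
        rw [← pvFM_iff, hnfm]; simp
      constructor
      · rintro (⟨q, hq, hpre⟩ | ⟨k, hk, hinf⟩)
        · obtain ⟨p, hp, h1, h2, rfl⟩ := pv_mem_adv.mp hq
          have hlt : p.2 < p.1.length := (List.getElem?_eq_some_iff.mp h1).1
          have hgc : p.1[p.2]'hlt = c := (List.getElem?_eq_some_iff.mp h1).2
          have hdrop : p.1.drop p.2 = c :: p.1.drop (p.2 + 1) := by
            rw [List.drop_eq_getElem_cons hlt, hgc]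
          have hpre' : p.1.drop (p.2 + 1) <+: rest := by simpa using hpre
          rcases List.mem_append.mp hp with hps | hpk
          · exact Or.inl ⟨p, hps, by
              rw [hdrop]; exact List.cons_prefix_cons.mpr ⟨rfl, hpre'⟩⟩
          · obtain ⟨k, hk, rfl⟩ := List.mem_map.mp hpk
            refine Or.inr ⟨k, hk, List.IsPrefix.isInfix ?_⟩
            have hkc : k = c :: k.drop 1 := by simpa using hdrop
            rw [hkc]
            exact List.cons_prefix_cons.mpr ⟨rfl, by simpa using hpre'⟩
        · exact Or.inr ⟨k, hk, hinf.trans (List.suffix_cons c rest).isInfix⟩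
      · rintro (⟨p, hp, hpre⟩ | ⟨k, hk, hinf⟩)
        · have hlt : p.2 < p.1.length := (hinv p hp).2
          rw [List.drop_eq_getElem_cons hlt] at hpre
          obtain ⟨hc, hpre'⟩ := List.cons_prefix_cons.mp hpre
          have h1 : p.1[p.2]? = some c := List.getElem?_eq_some_iff.mpr ⟨hlt, hc⟩
          have h2 : p.2 + 1 ≠ p.1.length := by
            intro h2
            exact hnfm' ⟨p, List.mem_append.mpr (Or.inl hp), h1, h2⟩
          exact Or.inl ⟨(p.1, p.2 + 1),
            pv_mem_adv.mpr ⟨p, List.mem_append.mpr (Or.inl hp), h1, h2, rfl⟩, hpre'⟩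
        · rcases List.infix_cons_iff.mp hinf with hpre | hinf'
          · rcases hk' : k with _ | ⟨a, u⟩
            · exact absurd hk' (pv_keys_ne k hk)
            subst hk'
            obtain ⟨hc, hpre'⟩ := List.cons_prefix_cons.mp hpre
            subst hc
            have hmem : ((a :: u, 0) : List Char × Nat) ∈ cands :=
              List.mem_append.mpr (Or.inr (List.mem_map.mpr ⟨a :: u, hk, rfl⟩))
            have h1 : (a :: u)[0]? = some a := rfl
            have h2 : (0 : Nat) + 1 ≠ (a :: u).length := by
              intro h2
              exact hnfm' ⟨(a :: u, 0), hmem, h1, h2⟩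
            refine Or.inl ⟨(a :: u, 1),
              pv_mem_adv.mpr ⟨(a :: u, 0), hmem, h1, h2, rfl⟩, ?_⟩
            simpa using hpre'
          · exact Or.inr ⟨k, hk, hinf'⟩
    have hunf : pvScanAux s (c :: rest)
        = match pvStepGo c [] cands with
          | none => true
          | some nxt => pvScanAux nxt rest := rfl
    rw [hunf, pvStepGo_eq]
    rcases hfm : pvFM c cands with _ | _
    · rw [if_neg (by simp)]
      show pvScanAux ([] ++ pvAdv c cands) rest = true ↔ pvM s (c :: rest)
      rw [List.nil_append, ih]
      exact htrans hfm
    · rw [if_pos (by simp)]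
      simpa using hFMok hfm

-- per sentence: the state-set scan accepts iff some keyword occurs as a substring
lemma pv_scan_infix (t : List Char) :
    pvScan t = true ↔ ∃ k ∈ pvKeysC, k <:+: t := by
  rw [pvScan, pv_scan_iff t [] (by simp)]
  unfold pvM
  simp

lemma pvLoopB_any :
    ∀ (l : List String),
      pvLoopB l = l.any (fun sent => pvScan (PySem.Str.lower sent).toList)
  | [] => rfl
  | sent :: rest => by
    simp only [pvLoopB, List.any_cons, pvLoopB_any rest]
    simp

-- reading sents[a], …, sents[a+m-1] is the corresponding drop/take segment
lemma pv_map_range (sents : List String) :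
    ∀ (m : Nat) (a : Int), 0 ≤ a → a + m ≤ (sents.length : Int) →
      (PySem.List.pyRange a (a + m)).map (fun i => PySem.List.pyGetD sents i "")
        = (sents.drop a.toNat).take m := by
  intro m
  induction m with
  | zero =>
    intro a h0 hm
    simp [PySem.List.pyRange]
  | succ m ih =>
    intro a h0 hm
    have hm' : a + (m : Int) + 1 ≤ (sents.length : Int) := by push_cast at hm; omega
    have hcast : a + ((m + 1 : Nat) : Int) = (a + 1) + (m : Int) := by push_cast; ring
    have hlt : a.toNat < sents.length := by omega
    rw [hcast, PySem.List.pyRange_one_cons (by omega), List.map_cons,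
      ih (a + 1) (by omega) (by omega),
      PySem.List.pyGetD_eq_getElem sents "" h0 (by omega),
      List.drop_eq_getElem_cons hlt, List.take_succ_cons,
      show (a + 1).toNat = a.toNat + 1 by omega]

-- A's index window and B's slice produce the same list of sentences
lemma pv_window (sents : List String) (idx : Int) :
    (PySem.List.pyRange (max 0 (idx - 1)) (min ((sents.length : Int) - 1) (idx + 1) + 1)).map
        (fun i => PySem.List.pyGetD sents i "")
      = PySem.List.slice sents (some (max 0 (idx - 1))) (some (max 0 (idx + 1 + 1))) := by
  have hlo : ¬ (max 0 (idx - 1) < 0) := by omega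
  have hhi : ¬ (max 0 (idx + 1 + 1) < 0) := by omega
  simp only [PySem.List.slice, PySem.List.clampIdx, if_neg hlo, if_neg hhi]
  by_cases h : min ((sents.length : Int) - 1) (idx + 1) + 1 ≤ max 0 (idx - 1)
  · have h1 : PySem.List.pyRange (max 0 (idx - 1))
        (min ((sents.length : Int) - 1) (idx + 1) + 1) = [] := by
      simp [PySem.List.pyRange]; omega
    have h2 : min (max 0 (idx + 1 + 1)).toNat sents.length
        - min (max 0 (idx - 1)).toNat sents.length = 0 := by omega
    rw [h1, h2]
    simp
  · push Not at h
    set lo : Int := max 0 (idx - 1) with hlodef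
    have hlo0 : 0 ≤ lo := by omega
    set m : Nat := (min ((sents.length : Int) - 1) (idx + 1) + 1 - lo).toNat with hmdef
    have hb : min ((sents.length : Int) - 1) (idx + 1) + 1 = lo + m := by omega
    rw [hb, pv_map_range sents m lo hlo0 (by omega)]
    have ha : min lo.toNat sents.length = lo.toNat := by omega
    rw [ha]
    congr 1
    omega

lemma pv_keys_map : pvKeysC
    = (["implemented", "established", "maintained", "audit",
        "certified", "monitored", "trained", "reviewed",
        "tested", "assessed"] : List String).map String.toList := by decide

lemma pv_sentence (s : String) :
    (["implemented", "established", "maintained", "audit",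
      "certified", "monitored", "trained", "reviewed",
      "tested", "assessed"] : List String).any
        (fun k => PySem.Str.isIn k (PySem.Str.lower s))
      = pvScan (PySem.Str.lower s).toList := by
  rw [Bool.eq_iff_iff, pv_scan_infix, List.any_eq_true, pv_keys_map]
  constructor
  · rintro ⟨k, hk, h⟩
    refine ⟨k.toList, List.mem_map_of_mem hk, ?_⟩
    rw [PySem.Str.isIn_eq, PySem.Chars.isIn_iff_infix] at h
    simpa using h
  · rintro ⟨kc, hkc, h⟩
    obtain ⟨k, hk, rfl⟩ := List.mem_map.mp hkc
    refine ⟨k, hk, ?_⟩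
    rw [PySem.Str.isIn_eq, PySem.Chars.isIn_iff_infix]
    simpa using h

lemma pv_core (sents : List String) (idx : Int) :
    has_evidence sents idx = has_evidence_alt sents idx := by
  simp only [has_evidence, has_evidence_alt]
  rw [pvLoopB_any, ← pv_window sents idx, List.any_map]
  congr 1
  funext i
  exact pv_sentence (PySem.List.pyGetD sents i "")

-- ===== VERDICT (by name: the statement is the Claim_ definition above) =====
theorem has_evidence_spec : Claim_equal_has_evidence := by
  intro sents idx _
  unfold Spec_has_evidence
  exact pv_core sents idx
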